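/-
  SEGMENT F6 OF `start_decoder` (0x115714–0x115840; stb_vorbis_fixed.c 4015–4024) SPLIT AT THE HEADS OF ITS THREE SEQUENTIAL LOOPS (the
  cut points its first worker proposed, farm attempt start_decoder.F6.1): the assertions at the three loop heads, the claims of the
  four children, and the composition `SegF6.of_parts` (pure logic: `ReachVia.trans`, three `ReachVia.loop`; no machine step).

      F6a  0x115714–0x115719 (2 insns)     `j = 0` from the literal 0 of `d[R+24H]`, the jump to the head of loop 4015
                                           exit: AtF6P (`loop23` = 0x115768) with j = 0
      F6b  0x115768–0x11577d + 0x11571b–0x115764 + 0x11577f–0x115799 (25 insns)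
                                           ONE ROUND of loop 4015 `p[j].x = g->Xlist[j]; p[j].id = j` (checks 0x11576f, 0x11572e, 0x115744,
                                           0x115756), or, when `values ≤ j`, `qsort(p, values, 4, point_compare)` and `j = 0`
                                           exits: AtF6P with j + 1 (the measure `250 − r12` smaller), AtF6Q (`loop24` = 0x11579e) with j = 0
      F6c  0x11579e–0x115804 (22 insns)    ONE ROUND of loop 4020 `if (p[j].x == p[j+1].x) return error(…)` (checks 0x1157a5, 0x1157c9,
                                           0x1157e2), the stub `error(f, 20)` → the epilogue, or, when `values − 1 ≤ j`, `j = 0`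
                                           exits: AtF6Q with j + 1 (the measure `250 − r12` smaller), AtERR, AtF6S (`loop25` = 0x115809) with j = 0
      F6d  0x115809–0x115840 (11 insns)    ONE ROUND of loop 4023 `g->sorted_order[j] = (uint8) p[j].id` (checks 0x115819, 0x11582f)
                                           exits: AtF6S with j + 1 (the measure `250 − r12` smaller), AtF7 (`jle` 0x11580c taken)

  WHAT IS LIVE AT THE CUTS (c/vorbis_f_insns.txt): rbp = f, rbx = g(i) everywhere; r12d = j at the three heads; r13d = `values` at the
  head of loop 4023 only (`mov r13d, [rbx+638H]` 0x1157aa, read by `cmp r13d, r12d` 0x115809; in loops 4015 / 4020 r13 is written before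
  it is read); r14, r15 are written before they are read in every round. The stack array `p` is `[R + 120H, R + 508H)`.

  THE BOUND `n ≤ 16` (finding of the workers of F5 and F6): `Floor5.classes : ClassesUpTo … n` has no upper bound on the ghost `n`, and
  `ClassOK c` reads the class tables at index `c`, which for large `c` alias `sorted_order`: `Floor6 … n` is kept by the stores of loop 4023
  only for `n ≤ 16`. The assertions below carry the bound; `F6.inF6_of_body` cuts the entry's `n` down to `min n 16` (`mc ≤ 15 < n`), and
  the exit `AtF7` quantifies `n` existentially.
-/
import Vorbis.Spec.StartDecoderB
namespace Vorbis.Spec.StartDecoder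
open X86 X86.User Asan

/-- **The common part of F6's cut points**: `BodyF6` with the program counter as a parameter, and the bound `n ≤ 16` on the class
transient's counter (see the file header). -/
structure InF6 (u₀ : State) (g : Ghost) (i : Nat) (A5 : Arena) (A : Arena × List Obj) (mc : Int) (n : Nat) (pc : Word)
    (v : State) : Prop where
  /-- the loop invariant of the floor section at `pc` -/
  loop : FloorLoop u₀ g pc i A5 A v
  /-- rbx = g = floor_config + 1596·i -/
  rbx : v.reg .rbx = addr (floorAt g v.mem i)
  /-- FL3(i) – FL8(i), XL of the element under construction -/
  cur : Floor6 g v.mem i mc n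
  /-- the class transient is cut at 16 classes -/
  n_le : n ≤ 16

/-- **The head of loop 4015, 0x115768 (`loop23`)** (`for (j = 0; j < g->values; ++j)`): `InF6` here, r12 = j (the whole register:
`mov r12d, [rsp+24H]`, `add r12d, 1` zero-extend), `j ≤ values`, and the transient `PFill` of Vorbis/Floor.lean §6 over the stack array
`p = [R + 120H, …)`: the `id` halves of the records below `j` are set. r13 – r15 are dead. -/
def AtF6P (u₀ : State) (g : Ghost) (i : Nat) (v : State) : Prop :=
  ∃ (A5 : Arena) (A : Arena × List Obj) (mc : Int) (n j : Nat),
    InF6 u₀ g i A5 A mc n L.start_decoder.loop23 v ∧ v.reg .r12 = addr j ∧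
    (j : Int) ≤ Floor1.values v.mem (floorAt g v.mem i) ∧ PFill v.mem (g.R + 0x120) j

/-- **The head of loop 4020, 0x11579e (`loop24`)** (`for (j = 0; j < g->values − 1; ++j)`): `InF6` here, r12 = j, `j ≤ values`, and PID
(every record of `p[0 .. values)` has an `id` below `values`: `PID.of_fill` at the exit of loop 4015, kept by qsort's
record preservation, `PID.of_records`). The loop writes nothing but return addresses. r13 – r15 are dead. -/
def AtF6Q (u₀ : State) (g : Ghost) (i : Nat) (v : State) : Prop :=
  ∃ (A5 : Arena) (A : Arena × List Obj) (mc : Int) (n j : Nat),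
    InF6 u₀ g i A5 A mc n L.start_decoder.loop24 v ∧ v.reg .r12 = addr j ∧
    (j : Int) ≤ Floor1.values v.mem (floorAt g v.mem i) ∧ PID v.mem (floorAt g v.mem i) (g.R + 0x120)

/-- **The head of loop 4023, 0x115809 (`loop25`)** (`for (j = 0; j < g->values; ++j)`): `InF6` here, PID, r13d = `values` (loaded at
0x1157aa in the last round of loop 4020), r12 = j, `j ≤ values`, and the transient `SortedUpTo … j` (FL9 for the entries below `j`).
r14, r15 are dead. -/
def AtF6S (u₀ : State) (g : Ghost) (i : Nat) (v : State) : Prop :=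
  ∃ (A5 : Arena) (A : Arena × List Obj) (mc : Int) (n j : Nat),
    InF6 u₀ g i A5 A mc n L.start_decoder.loop25 v ∧ PID v.mem (floorAt g v.mem i) (g.R + 0x120) ∧
    v.reg .r13 = word32 (Floor1.values v.mem (floorAt g v.mem i)) ∧ v.reg .r12 = addr j ∧
    (j : Int) ≤ Floor1.values v.mem (floorAt g v.mem i) ∧ SortedUpTo v.mem (floorAt g v.mem i) j

/-- **Segment `start_decoder.F6a`** (0x115714–0x115719: `j = 0`, the jump to the head of loop 4015). -/
def SegF6a (Lay : Layout) (μ : Microarch) (u₀ : State) : Prop :=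
  ∀ (g : Ghost) (i : Nat) (v : State), AtF6 u₀ g i v → ReachVia Lay μ WayInv v (fun w => AtF6P u₀ g i w)

/-- **Segment `start_decoder.F6b`** (ONE ROUND of loop 4015, 0x115768–0x11577d + 0x11571b–0x115764, or its exit arm 0x11577f–0x115799
with the call of qsort): back at the head WITH A SMALLER MEASURE `250 − r12` (`j` grows by one and `j < values ≤ 250`), or at the head
of loop 4020. -/
def SegF6b (Lay : Layout) (μ : Microarch) (u₀ : State) : Prop :=
  ∀ (g : Ghost) (i : Nat) (v : State), AtF6P u₀ g i v →
    ReachVia Lay μ WayInv v (fun w =>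
      (AtF6P u₀ g i w ∧ 250 - (w.reg .r12).toNat < 250 - (v.reg .r12).toNat) ∨ AtF6Q u₀ g i w)

/-- **Segment `start_decoder.F6c`** (ONE ROUND of loop 4020, 0x11579e–0x1157f0, with the stub `error(f, VORBIS_invalid_setup)`
0x1157f2–0x1157ff and the exit 0x115804): back at the head WITH A SMALLER MEASURE `250 − r12`, or to the epilogue (two equal X), or at
the head of loop 4023. -/
def SegF6c (Lay : Layout) (μ : Microarch) (u₀ : State) : Prop :=
  ∀ (g : Ghost) (i : Nat) (v : State), AtF6Q u₀ g i v →
    ReachVia Lay μ WayInv v (fun w =>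
      (AtF6Q u₀ g i w ∧ 250 - (w.reg .r12).toNat < 250 - (v.reg .r12).toNat) ∨ AtERR u₀ g w ∨ AtF6S u₀ g i w)

/-- **Segment `start_decoder.F6d`** (ONE ROUND of loop 4023, 0x115809–0x115840): back at the head WITH A SMALLER MEASURE `250 − r12`, or,
when `values ≤ j`, to F7. -/
def SegF6d (Lay : Layout) (μ : Microarch) (u₀ : State) : Prop :=
  ∀ (g : Ghost) (i : Nat) (v : State), AtF6S u₀ g i v →
    ReachVia Lay μ WayInv v (fun w =>
      (AtF6S u₀ g i w ∧ 250 - (w.reg .r12).toNat < 250 - (v.reg .r12).toNat) ∨ AtF7 u₀ g i w)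

/-- **Segment F6 from its four parts**: F6a reaches the head of loop 4015; each of the three loops by `ReachVia.loop` with the measure
`250 − r12` (the round's claim states the decrease): loop 4015 reaches the head of loop 4020, loop 4020 the epilogue or the head of
loop 4023, loop 4023 reaches F7. -/
theorem SegF6.of_parts {Lay : Layout} {μ : Microarch} {u₀ : State} (ha : SegF6a Lay μ u₀) (hb : SegF6b Lay μ u₀)
    (hc : SegF6c Lay μ u₀) (hd : SegF6d Lay μ u₀) : SegF6 Lay μ u₀ := by
  intro g i v hat
  -- loop 4015: from any state at its head to the head of loop 4020
  have hloopP : ∀ s, AtF6P u₀ g i s → ReachVia Lay μ WayInv s (fun w => AtF6Q u₀ g i w) := by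
    apply ReachVia.loop (fun s => 250 - (s.reg .r12).toNat)
    intro s hs
    refine (hb g i s hs).mono ?_
    intro w hw
    rcases hw with ⟨hl, hlt⟩ | hq
    · exact Or.inr ⟨hl, hlt⟩
    · exact Or.inl hq
  -- loop 4020: from any state at its head to the epilogue or the head of loop 4023
  have hloopQ : ∀ s, AtF6Q u₀ g i s → ReachVia Lay μ WayInv s (fun w => AtERR u₀ g w ∨ AtF6S u₀ g i w) := by
    apply ReachVia.loop (fun s => 250 - (s.reg .r12).toNat)
    intro s hs
    refine (hc g i s hs).mono ?_
    intro w hw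
    rcases hw with ⟨hl, hlt⟩ | herr | hs'
    · exact Or.inr ⟨hl, hlt⟩
    · exact Or.inl (Or.inl herr)
    · exact Or.inl (Or.inr hs')
  -- loop 4023: from any state at its head to F7
  have hloopS : ∀ s, AtF6S u₀ g i s → ReachVia Lay μ WayInv s (fun w => AtF7 u₀ g i w) := by
    apply ReachVia.loop (fun s => 250 - (s.reg .r12).toNat)
    intro s hs
    refine (hd g i s hs).mono ?_
    intro w hw
    rcases hw with ⟨hl, hlt⟩ | h7
    · exact Or.inr ⟨hl, hlt⟩
    · exact Or.inl h7
  refine (ha g i v hat).trans ?_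
  intro v1 h1
  refine (hloopP v1 h1).trans ?_
  intro v2 h2
  refine (hloopQ v2 h2).trans ?_
  intro v3 h3
  rcases h3 with herr | hs
  · exact ReachVia.done (Or.inr herr)
  · exact (hloopS v3 hs).mono (fun w hw => Or.inl hw)

/-! ### The entry and the last exit from the assertions (pure) -/

namespace F6

/-- **The entry assertion of F6 gives `InF6` at `pc_F6`**, with the class transient cut at 16 classes: only the classes
`≤ max_class ≤ 15` are ever used (`Floor4.mc_hi`), so `ClassesUpTo … (min n 16)` and `mc < min n 16` still hold. -/
theorem inF6_of_body {u₀ : State} {g : Ghost} {i : Nat} {A5 : Arena} {A : Arena × List Obj} {mc : Int} {n : Nat} {v : State}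
    (h : BodyF6 u₀ g i A5 A mc n v) : InF6 u₀ g i A5 A mc (min n 16) pc_F6 v := by
  obtain ⟨⟨hb, hcls, hmcn⟩, h7, h8, hxl⟩ := h.cur
  have hmc := hb.mc_hi
  refine ⟨h.loop, h.rbx, ⟨⟨hb, ?_, ?_⟩, h7, h8, hxl⟩, Nat.min_le_right _ _⟩
  · intro c hc
    exact hcls c (by omega)
  · omega

/-- **F6d's exit 0x11580c → 0x115842 (loop 4023 is done)**: the clauses of the loop head with `values ≤ j` (`jle` taken), the loop
invariant moved to the address of F7 (no store in between), are the entry assertion of segment F7: FL9 as `SortedUpTo … values`. -/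
theorem atF7_of_loop {u₀ : State} {g : Ghost} {i : Nat} {A5 : Arena} {A : Arena × List Obj} {mc : Int} {n j : Nat} {v s : State}
    (hv : InF6 u₀ g i A5 A mc n L.start_decoder.loop25 v) (hj : (j : Int) ≤ Floor1.values v.mem (floorAt g v.mem i))
    (hsorted : SortedUpTo v.mem (floorAt g v.mem i) j) (h : FloorLoop u₀ g pc_F7 i A5 A s) (hmem : s.mem = v.mem)
    (hrbx : s.reg .rbx = v.reg .rbx) (hge : Floor1.values v.mem (floorAt g v.mem i) ≤ (j : Int)) : AtF7 u₀ g i s := by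
  have hjv : (Floor1.values v.mem (floorAt g v.mem i)).toNat = j := by omega
  refine ⟨A5, A, mc, n, h, ?_, ?_, ?_⟩
  · rw [hrbx, hmem]
    exact hv.rbx
  · rw [hmem]
    exact hv.cur
  · rw [hmem, hjv]
    exact hsorted

end F6

end Vorbis.Spec.StartDecoder
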